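-- pv_equiv track=rewrite | github.com/andrefpoliveira/AdventOfCode | 2015/day3.py | part2
-- ===== SOURCE A (Python) =====
-- def part2(input_text):
--     x,y = 0,0
--     x2,y2 = 0,0
--     visited = set()
--     visited.add((0,0))
--     d = {">": [0,1], "<": [0,-1], "v": [-1,0], "^": [1,0]}
--     for idx, i in enumerate(input_text):
--         if idx % 2 == 0:
--             x += d[i][0]
--             y += d[i][1]
--             visited.add((x,y))
--         else:
--             x2 += d[i][0]
--             y2 += d[i][1]
--             visited.add((x2,y2))
--
--     return len(visited)
-- ===== SOURCE B (Python) =====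
-- def part2(input_text):
--     moves = {">": (0, 1), "<": (0, -1), "v": (-1, 0), "^": (1, 0)}
--     visited = {(0, 0)}
--     for seq in (input_text[0::2], input_text[1::2]):
--         x, y = 0, 0
--         for c in seq:
--             dx, dy = moves[c]
--             x += dx
--             y += dy
--             visited.add((x, y))
--     return len(visited)
-- ===== Notes on version B (the rewrite author's own statement) =====
-- stated objective: alternative
-- what changed: Replaces the single interleaved loop that branches on index parity with slicing the input into the two agents' subsequences (input_text[0::2], input_text[1::2]) and running one independent accumulate-positions pass per agent over its own subsequence.
import Mathlib
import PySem

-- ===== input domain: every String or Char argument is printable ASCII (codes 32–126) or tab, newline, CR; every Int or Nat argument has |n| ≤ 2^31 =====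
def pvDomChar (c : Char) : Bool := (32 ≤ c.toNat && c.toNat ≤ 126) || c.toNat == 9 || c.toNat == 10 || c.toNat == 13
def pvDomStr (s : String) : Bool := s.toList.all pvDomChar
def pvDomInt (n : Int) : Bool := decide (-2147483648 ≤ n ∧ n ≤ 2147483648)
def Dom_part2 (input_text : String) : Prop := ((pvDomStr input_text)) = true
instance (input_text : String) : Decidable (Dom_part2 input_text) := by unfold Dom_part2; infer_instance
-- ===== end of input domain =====

-- B replaces A's interleaved parity-branch loop by slicing the input into the two agents'
-- subsequences (input_text[0::2] / [1::2]) and running one independent pass per agent (alternative decomposition, same cost).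


-- ===== PORT A =====
-- d = {">": [0,1], "<": [0,-1], "v": [-1,0], "^": [1,0]}
def part2_d : PySem.Dict Char (List Int) :=
  PySem.Dict.ofList [('>', [0, 1]), ('<', [0, -1]), ('v', [-1, 0]), ('^', [1, 0])]

-- the body of A's 'for idx, i in enumerate(...)' loop; d[i] is totalized as getD/pyGetD
-- (exact under Pre_part2, which excludes the chars on which Python's d[i] raises KeyError)
def part2_step (st : Int × Int × Int × Int × PySem.Set (Int × Int)) (p : Int × Char) :
    Int × Int × Int × Int × PySem.Set (Int × Int) :=
  match st, p with
  | (x, y, x2, y2, visited), (idx, i) =>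
    if PySem.Int.mod idx 2 == 0 then
      let x := x + PySem.List.pyGetD (part2_d.getD i []) 0 0
      let y := y + PySem.List.pyGetD (part2_d.getD i []) 1 0
      (x, y, x2, y2, PySem.Set.add visited (x, y))
    else
      let x2 := x2 + PySem.List.pyGetD (part2_d.getD i []) 0 0
      let y2 := y2 + PySem.List.pyGetD (part2_d.getD i []) 1 0
      (x, y, x2, y2, PySem.Set.add visited (x2, y2))

def part2 (input_text : String) : Int :=
  let visited : PySem.Set (Int × Int) := PySem.Set.add PySem.Set.empty (0, 0)
  let fin := (PySem.List.enumerate input_text.toList 0).foldl part2_step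
    ((0 : Int), (0 : Int), (0 : Int), (0 : Int), visited)
  PySem.Set.len fin.2.2.2.2

-- ===== PORT B =====
-- moves = {">": (0,1), "<": (0,-1), "v": (-1,0), "^": (1,0)}
def part2_alt_moves : PySem.Dict Char (Int × Int) :=
  PySem.Dict.ofList [('>', (0, 1)), ('<', (0, -1)), ('v', (-1, 0)), ('^', (1, 0))]

-- body of the inner 'for c in seq' loop; moves[c] totalized as getD (exact under Pre_part2)
def part2_alt_step (st : Int × Int × PySem.Set (Int × Int)) (c : Char) :
    Int × Int × PySem.Set (Int × Int) :=
  match st with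
  | (x, y, visited) =>
    let d := part2_alt_moves.getD c (0, 0)
    let x := x + d.1
    let y := y + d.2
    (x, y, PySem.Set.add visited (x, y))

def part2_alt (input_text : String) : Int :=
  let cs := input_text.toList
  let visited : PySem.Set (Int × Int) := PySem.Set.add PySem.Set.empty (0, 0)
  -- for seq in (input_text[0::2], input_text[1::2]):
  let fin := [(PySem.List.slice? cs (some 0) none 2).getD [],
              (PySem.List.slice? cs (some 1) none 2).getD []].foldl
    (fun visited seq => (seq.foldl part2_alt_step ((0 : Int), (0 : Int), visited)).2.2) visited
  PySem.Set.len fin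

-- ===== PRECONDITION & SPEC =====
-- Pre_ excludes exactly the inputs containing a character that is not one of the four direction keys, on which A's d[i] raises KeyError.
def Pre_part2 (input_text : String) : Prop :=
  input_text.toList.all (fun c => c ∈ ['>', '<', 'v', '^']) = true
instance (input_text : String) : Decidable (Pre_part2 input_text) := by unfold Pre_part2; infer_instance
def pvWitness_part2 : String := ">^<v^"

def Spec_part2 (input_text : String) (out : Int) : Prop := out = part2_alt input_text
instance (input_text : String) (out : Int) : Decidable (Spec_part2 input_text out) := by unfold Spec_part2; infer_instance

-- ===== CLAIM (what is proved, stated in full; the proofs are below) =====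
def Claim_equal_part2 : Prop := ∀ (input_text : String), Dom_part2 input_text → Pre_part2 input_text → Spec_part2 input_text (part2 input_text)

-- ===== LEMMAS AND PROOFS =====

-- the per-char displacement, as B's dict gives it
def pvDelta (c : Char) : Int × Int := part2_alt_moves.getD c (0, 0)

-- A's two dict/list lookups give the same displacement as B's, for every char
lemma pvDelta_eq (c : Char) :
    (PySem.List.pyGetD (part2_d.getD c []) 0 0, PySem.List.pyGetD (part2_d.getD c []) 1 0)
      = pvDelta c := by
  by_cases h1 : c = '>'
  · subst h1; decide
  by_cases h2 : c = '<'
  · subst h2; decide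
  by_cases h3 : c = 'v'
  · subst h3; decide
  by_cases h4 : c = '^'
  · subst h4; decide
  · have f1 : (('>' : Char) == c) = false := beq_eq_false_iff_ne.mpr (Ne.symm h1)
    have f2 : (('<' : Char) == c) = false := beq_eq_false_iff_ne.mpr (Ne.symm h2)
    have f3 : (('v' : Char) == c) = false := beq_eq_false_iff_ne.mpr (Ne.symm h3)
    have f4 : (('^' : Char) == c) = false := beq_eq_false_iff_ne.mpr (Ne.symm h4)
    simp [part2_d, part2_alt_moves, pvDelta, PySem.Dict.getD, PySem.Dict.get?,
      PySem.Dict.ofList, PySem.Dict.update, PySem.Dict.insert, PySem.Dict.empty,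
      PySem.Dict.contains, List.find?, f1, f2, f3, f4,
      PySem.List.pyGetD, PySem.List.pyGet?, PySem.List.pyIdx?]

-- every other element of a list, starting with the first
def everyOther {α : Type} : List α → List α
  | [] => []
  | [a] => [a]
  | a :: _ :: t => a :: everyOther t

lemma everyOther_cons {α : Type} (a : α) (t : List α) :
    everyOther (a :: t) = a :: everyOther t.tail := by
  cases t <;> rfl

lemma fm_even {α : Type} (xs : List α) :
    (List.range ((xs.length + 1) / 2)).filterMap (fun k => xs[2 * k]?) = everyOther xs := by
  induction xs using everyOther.induct with
  | case1 => simp [everyOther]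
  | case2 a => simp [everyOther]
  | case3 a b t ih =>
    have hlen : ((a :: b :: t).length + 1) / 2 = (t.length + 1) / 2 + 1 := by
      simp; omega
    rw [hlen, List.range_succ_eq_map, List.filterMap_cons, List.filterMap_map]
    simp only [List.getElem?_cons_zero, Nat.mul_zero]
    show a :: List.filterMap _ _ = everyOther (a :: b :: t)
    have hf : ((fun k => (a :: b :: t)[2 * k]?) ∘ Nat.succ) = (fun k : Nat => t[2 * k]?) := by
      funext k
      show (a :: b :: t)[2 * (k + 1)]? = t[2 * k]?
      rw [show 2 * (k + 1) = 2 * k + 1 + 1 from by omega]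
      simp
    rw [hf, ih]; rfl

-- xs[0::2] and xs[1::2]
lemma slice_even (xs : List Char) :
    (PySem.List.slice? xs (some 0) none 2).getD [] = everyOther xs := by
  rw [PySem.List.slice?]
  simp only [PySem.List.sliceIndices]
  norm_num
  have hc : (if 0 < xs.length then (((xs.length : Int) + 2 - 1) / 2).toNat else 0)
      = (xs.length + 1) / 2 := by split <;> omega
  have hf : (fun x : Nat => xs[(2 * (x : Int)).toNat]?) = fun x : Nat => xs[2 * x]? := by
    funext k
    congr 1
  rw [hc, hf, fm_even]

lemma slice_odd (xs : List Char) :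
    (PySem.List.slice? xs (some 1) none 2).getD [] = everyOther xs.tail := by
  cases xs with
  | nil => rfl
  | cons a t =>
    rw [PySem.List.slice?]
    simp only [PySem.List.sliceIndices]
    norm_num
    have hc : (if 0 < t.length then (((t.length : Int) + 2 - 1) / 2).toNat else 0)
        = (t.length + 1) / 2 := by split <;> omega
    have hf : (fun x : Nat => (a :: t)[(1 + 2 * (x : Int)).toNat]?)
        = fun x : Nat => t[2 * x]? := by
      funext k
      rw [show ((1 : Int) + 2 * (k : Int)).toNat = 2 * k + 1 from by omega]
      simp
    rw [hc, hf, fm_even]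

-- the successive positions of one agent starting at p and following cs
def traj (p : Int × Int) : List Char → List (Int × Int)
  | [] => []
  | c :: cs => (p.1 + (pvDelta c).1, p.2 + (pvDelta c).2) ::
      traj (p.1 + (pvDelta c).1, p.2 + (pvDelta c).2) cs

-- the positions A's loop inserts, in A's order; b = "next char moves agent 1"
def pts (p1 p2 : Int × Int) (b : Bool) : List Char → List (Int × Int)
  | [] => []
  | c :: cs =>
    if b then
      (p1.1 + (pvDelta c).1, p1.2 + (pvDelta c).2) ::
        pts (p1.1 + (pvDelta c).1, p1.2 + (pvDelta c).2) p2 false cs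
    else
      (p2.1 + (pvDelta c).1, p2.2 + (pvDelta c).2) ::
        pts p1 (p2.1 + (pvDelta c).1, p2.2 + (pvDelta c).2) true cs

-- A's visited set is V updated with pts
lemma A_visited (cs : List Char) : ∀ (s x y x2 y2 : Int)
    (V : PySem.Set (Int × Int)), 0 ≤ s →
    ((PySem.List.enumerate cs s).foldl part2_step (x, y, x2, y2, V)).2.2.2.2
      = PySem.Set.update V (pts (x, y) (x2, y2) (decide (s % 2 = 0)) cs) := by
  induction cs with
  | nil => simp [PySem.List.enumerate, pts, PySem.Set.update]
  | cons c cs ih =>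
    intro s x y x2 y2 V hs
    rw [PySem.List.enumerate_cons, List.foldl_cons]
    have hd := pvDelta_eq c
    have hd1 : PySem.List.pyGetD (part2_d.getD c []) 0 0 = (pvDelta c).1 := by
      rw [← hd]
    have hd2 : PySem.List.pyGetD (part2_d.getD c []) 1 0 = (pvDelta c).2 := by
      rw [← hd]
    by_cases hp : s % 2 = 0
    · have hstep : part2_step (x, y, x2, y2, V) (s, c)
          = (x + (pvDelta c).1, y + (pvDelta c).2, x2, y2,
             PySem.Set.add V (x + (pvDelta c).1, y + (pvDelta c).2)) := by
        simp [part2_step, hp, hd1, hd2]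
      rw [hstep, ih _ _ _ _ _ _ (by omega)]
      have hb : decide ((s + 1) % 2 = 0) = false := by simp; omega
      have hb0 : decide (s % 2 = 0) = true := by simp [hp]
      rw [hb, hb0]
      rw [show pts (x, y) (x2, y2) true (c :: cs)
          = (x + (pvDelta c).1, y + (pvDelta c).2) ::
            pts (x + (pvDelta c).1, y + (pvDelta c).2) (x2, y2) false cs from rfl]
      rw [PySem.Set.update_cons]
    · have hstep : part2_step (x, y, x2, y2, V) (s, c)
          = (x, y, x2 + (pvDelta c).1, y2 + (pvDelta c).2,
             PySem.Set.add V (x2 + (pvDelta c).1, y2 + (pvDelta c).2)) := by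
        simp [part2_step, hp, hd1, hd2]
      rw [hstep, ih _ _ _ _ _ _ (by omega)]
      have hb : decide ((s + 1) % 2 = 0) = true := by simp; omega
      have hb0 : decide (s % 2 = 0) = false := by simp [hp]
      rw [hb, hb0]
      rw [show pts (x, y) (x2, y2) false (c :: cs)
          = (x2 + (pvDelta c).1, y2 + (pvDelta c).2) ::
            pts (x, y) (x2 + (pvDelta c).1, y2 + (pvDelta c).2) true cs from rfl]
      rw [PySem.Set.update_cons]

-- B's one-agent loop: visited is V updated with traj
lemma B_visited (cs : List Char) : ∀ (x y : Int) (V : PySem.Set (Int × Int)),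
    (cs.foldl part2_alt_step (x, y, V)).2.2 = PySem.Set.update V (traj (x, y) cs) := by
  induction cs with
  | nil => intro x y V; simp [traj, PySem.Set.update]
  | cons c cs ih =>
    intro x y V
    rw [List.foldl_cons,
      show part2_alt_step (x, y, V) c
        = (x + (pvDelta c).1, y + (pvDelta c).2,
           PySem.Set.add V (x + (pvDelta c).1, y + (pvDelta c).2)) from rfl,
      ih,
      show traj (x, y) (c :: cs)
        = (x + (pvDelta c).1, y + (pvDelta c).2) ::
          traj (x + (pvDelta c).1, y + (pvDelta c).2) cs from rfl,
      PySem.Set.update_cons]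

-- interleaved insertions are a permutation of the two per-agent passes
lemma pts_perm (cs : List Char) : ∀ (b : Bool) (p1 p2 : Int × Int),
    (pts p1 p2 b cs).Perm
      (traj (cond b p1 p2) (everyOther cs) ++
       traj (cond b p2 p1) (everyOther cs.tail)) := by
  induction cs with
  | nil => intro b p1 p2; cases b <;> simp [pts, traj, everyOther]
  | cons c cs ih =>
    intro b p1 p2
    cases b with
    | true =>
      rw [show pts p1 p2 true (c :: cs)
          = (p1.1 + (pvDelta c).1, p1.2 + (pvDelta c).2) ::
            pts (p1.1 + (pvDelta c).1, p1.2 + (pvDelta c).2) p2 false cs from rfl]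
      have h1 := ih false (p1.1 + (pvDelta c).1, p1.2 + (pvDelta c).2) p2
      simp only [Bool.cond_false, Bool.cond_true] at h1 ⊢
      rw [everyOther_cons, List.tail_cons]
      rw [show traj p1 (c :: everyOther cs.tail)
          = (p1.1 + (pvDelta c).1, p1.2 + (pvDelta c).2) ::
            traj (p1.1 + (pvDelta c).1, p1.2 + (pvDelta c).2) (everyOther cs.tail) from rfl]
      refine List.Perm.trans (List.Perm.cons _ h1) ?_
      rw [List.cons_append]
      exact List.Perm.cons _ List.perm_append_comm
    | false =>
      rw [show pts p1 p2 false (c :: cs)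
          = (p2.1 + (pvDelta c).1, p2.2 + (pvDelta c).2) ::
            pts p1 (p2.1 + (pvDelta c).1, p2.2 + (pvDelta c).2) true cs from rfl]
      have h1 := ih true p1 (p2.1 + (pvDelta c).1, p2.2 + (pvDelta c).2)
      simp only [Bool.cond_false, Bool.cond_true] at h1 ⊢
      rw [everyOther_cons, List.tail_cons]
      rw [show traj p2 (c :: everyOther cs.tail)
          = (p2.1 + (pvDelta c).1, p2.2 + (pvDelta c).2) ::
            traj (p2.1 + (pvDelta c).1, p2.2 + (pvDelta c).2) (everyOther cs.tail) from rfl]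
      refine List.Perm.trans (List.Perm.cons _ h1) ?_
      rw [List.cons_append]
      exact List.Perm.cons _ List.perm_append_comm

lemma len_update_perm {xs ys : List (Int × Int)} (s : PySem.Set (Int × Int))
    (hs : s.Nodup) (h : xs.Perm ys) :
    PySem.Set.len (PySem.Set.update s xs) = PySem.Set.len (PySem.Set.update s ys) := by
  have hperm : (PySem.Set.update s xs).Perm (PySem.Set.update s ys) := by
    rw [List.perm_ext_iff_of_nodup (PySem.Set.nodup_update s xs hs)
      (PySem.Set.nodup_update s ys hs)]
    intro a
    rw [PySem.Set.mem_update, PySem.Set.mem_update]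
    exact or_congr Iff.rfl h.mem_iff
  simp [PySem.Set.len, hperm.length_eq]

-- ===== VERDICT (by name: the statement is the Claim_ definition above) =====
theorem part2_spec : Claim_equal_part2 := by
  unfold Claim_equal_part2
  intro input_text _ _
  unfold Spec_part2 part2 part2_alt
  simp only [List.foldl_cons, List.foldl_nil]
  rw [A_visited _ 0 0 0 0 0 _ (le_refl 0)]
  rw [B_visited, B_visited, slice_even, slice_odd]
  rw [← PySem.Set.update_append]
  have hnd : (PySem.Set.add PySem.Set.empty ((0 : Int), (0 : Int))).Nodup := by decide
  have hperm := pts_perm (input_text.toList) true (0, 0) (0, 0)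
  simp only [Bool.cond_true] at hperm
  exact len_update_perm _ hnd (by simpa using hperm)
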